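-- pv_equiv track=rewrite | github.com/zverok/spylls | spylls/hunspell/algo/permutations.py | badcharkey
-- ===== SOURCE A (Python) =====
-- from typing import Iterator, Union, List, Set
--
-- def badcharkey(word: str, layout: str) -> Iterator[str]:
--     """
--     Produces permutations with chars replaced by adjacent chars on keyboard layout ("vat -> cat")
--     or downcased (if it was accidental uppercase).
--
--     Uses :attr:`aff.KEY <spylls.hunspell.data.aff.Aff.KEY>`
--     """
--
--     for i, c in enumerate(word):
--         before = word[:i]
--         after = word[i+1:]
--         if c != c.upper():
--             yield before + c.upper() + after
--
--         if not layout: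
--             continue
--
--         pos = layout.find(c)
--         while pos != -1:
--             if pos > 0 and layout[pos-1] != '|':
--                 yield before + layout[pos-1] + after
--             if pos + 1 < len(layout) and layout[pos+1] != '|':
--                 yield before + layout[pos+1] + after
--             pos = layout.find(c, pos+1)
-- ===== SOURCE B (Python) =====
-- def badcharkey(word: str, layout: str):
--     # Build the keyboard-adjacency table once, then do a flat lookup pass over word.
--     adj = {}
--     for pos, ch in enumerate(layout):
--         lst = adj.setdefault(ch, [])
--         if pos > 0 and layout[pos - 1] != '|':
--             lst.append(layout[pos - 1])
--         if pos + 1 < len(layout) and layout[pos + 1] != '|':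
--             lst.append(layout[pos + 1])
--     for i, c in enumerate(word):
--         before = word[:i]
--         after = word[i + 1:]
--         if c != c.upper():
--             yield before + c.upper() + after
--         for nb in adj.get(c, ()):
--             yield before + nb + after
-- ===== Notes on version B (the rewrite author's own statement) =====
-- stated objective: alternative
-- what changed: Replaces A's repeated find/while scan of layout for every character of word by a single preprocessing pass that builds an adjacency table (char -> ordered neighbor list), then a flat lookup per word position.
import Mathlib
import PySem

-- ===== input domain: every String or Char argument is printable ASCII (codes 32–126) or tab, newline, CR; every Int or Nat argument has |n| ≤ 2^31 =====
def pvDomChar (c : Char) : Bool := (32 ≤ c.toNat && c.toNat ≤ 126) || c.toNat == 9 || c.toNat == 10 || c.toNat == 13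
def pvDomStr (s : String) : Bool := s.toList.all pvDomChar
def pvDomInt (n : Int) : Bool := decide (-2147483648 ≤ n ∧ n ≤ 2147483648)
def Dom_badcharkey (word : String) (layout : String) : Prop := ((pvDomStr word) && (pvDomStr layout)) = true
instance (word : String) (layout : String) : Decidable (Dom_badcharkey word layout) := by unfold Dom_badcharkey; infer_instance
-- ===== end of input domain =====

-- B replaces A's per-character find/while scan of layout by one preprocessing pass that
-- builds an adjacency table (char -> ordered neighbor list) and a flat lookup per position.

-- ===== PORT A =====
-- A's inner 'pos = layout.find(c); while pos != -1: ... pos = layout.find(c, pos+1)' loop,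
-- as the obvious recursion on the search start s (the 's ≤ len' guard only makes it total;
-- every call from the port satisfies it).
def badcharkeyScan (L : List Char) (c : Char) (before after : List Char) (s : Nat) : List String :=
  if hs : s ≤ L.length then
    if h : PySem.Chars.findFrom L [c] (s : Int) = -1 then []
    else
      (if 0 < (PySem.Chars.findFrom L [c] (s : Int)).toNat ∧
          L.getD ((PySem.Chars.findFrom L [c] (s : Int)).toNat - 1) ' ' ≠ '|' then
        [String.ofList (before ++ [L.getD ((PySem.Chars.findFrom L [c] (s : Int)).toNat - 1) ' '] ++ after)]
       else [])
      ++ (if (PySem.Chars.findFrom L [c] (s : Int)).toNat + 1 < L.length ∧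
            L.getD ((PySem.Chars.findFrom L [c] (s : Int)).toNat + 1) ' ' ≠ '|' then
        [String.ofList (before ++ [L.getD ((PySem.Chars.findFrom L [c] (s : Int)).toNat + 1) ' '] ++ after)]
       else [])
      ++ badcharkeyScan L c before after ((PySem.Chars.findFrom L [c] (s : Int)).toNat + 1)
  else []
termination_by L.length + 1 - s
decreasing_by
  have hspec := PySem.Chars.findFrom_natCast_spec L [c] s hs h
  have hplt : (PySem.Chars.findFrom L [c] (s : Int)).toNat < L.length := by
    rcases hspec.2.1 with ⟨t, ht⟩
    have hlen : (List.drop (PySem.Chars.findFrom L [c] (s : Int)).toNat L).length = t.length + 1 := by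
      rw [← ht]; simp
    simp only [List.length_drop] at hlen
    omega
  have h1 := hspec.1
  omega

def badcharkey (word : String) (layout : String) : List String :=
  (PySem.List.enumerate word.toList 0).flatMap fun ic =>
    let c := ic.2
    let before := PySem.Chars.slice word.toList none (some ic.1)
    let after := PySem.Chars.slice word.toList (some (ic.1 + 1)) none
    (if c ≠ PySem.Chars.upperChar c then
        [String.ofList (before ++ [PySem.Chars.upperChar c] ++ after)] else [])
    ++ (if layout.toList = [] then [] else badcharkeyScan layout.toList c before after 0)

-- ===== PORT B =====
-- One pass over layout building the adjacency table (left neighbor then right neighbor,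
-- positions left to right), as in Source B.
def badcharkeyAdj (L : List Char) : PySem.Dict Char (List Char) :=
  (PySem.List.enumerate L 0).foldl (fun d pc =>
    let pos := pc.1
    let ch := pc.2
    let l0 := d.getD ch []
    let l1 := if 0 < pos ∧ PySem.List.pyGetD L (pos - 1) ' ' ≠ '|'
              then l0 ++ [PySem.List.pyGetD L (pos - 1) ' '] else l0
    let l2 := if pos + 1 < (L.length : Int) ∧ PySem.List.pyGetD L (pos + 1) ' ' ≠ '|'
              then l1 ++ [PySem.List.pyGetD L (pos + 1) ' '] else l1
    d.insert ch l2) PySem.Dict.empty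

def badcharkey_alt (word : String) (layout : String) : List String :=
  let adj := badcharkeyAdj layout.toList
  (PySem.List.enumerate word.toList 0).flatMap fun ic =>
    let c := ic.2
    let before := PySem.Chars.slice word.toList none (some ic.1)
    let after := PySem.Chars.slice word.toList (some (ic.1 + 1)) none
    (if c ≠ PySem.Chars.upperChar c then
        [String.ofList (before ++ [PySem.Chars.upperChar c] ++ after)] else [])
    ++ (adj.getD c []).map (fun nb => String.ofList (before ++ [nb] ++ after))

-- ===== PRECONDITION & SPEC =====
def Spec_badcharkey (word : String) (layout : String) (out : List String) : Prop := out = badcharkey_alt word layout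
instance (word : String) (layout : String) (out : List String) : Decidable (Spec_badcharkey word layout out) := by unfold Spec_badcharkey; infer_instance

-- ===== CLAIM (what is proved, stated in full; the proofs are below) =====
def Claim_equal_badcharkey : Prop := ∀ (word : String) (layout : String), Dom_badcharkey word layout → Spec_badcharkey word layout (badcharkey word layout)

-- ===== LEMMAS AND PROOFS =====

-- The neighbor characters contributed by position p of the layout.
def nbrsAt (L : List Char) (p : Nat) : List Char :=
  (if 0 < p ∧ L.getD (p-1) ' ' ≠ '|' then [L.getD (p-1) ' '] else [])
  ++ (if p+1 < L.length ∧ L.getD (p+1) ' ' ≠ '|' then [L.getD (p+1) ' '] else [])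

-- All neighbors of c contributed by layout positions ≥ s, in order.
def nbrsFrom (L : List Char) (c : Char) (s : Nat) : List Char :=
  if s < L.length then
    (if L.getD s ' ' = c then nbrsAt L s else []) ++ nbrsFrom L c (s+1)
  else []
termination_by L.length - s

theorem singleton_prefix_iff_head (c : Char) (l : List Char) : [c] <+: l ↔ l[0]? = some c := by
  constructor
  · rintro ⟨t, rfl⟩; rfl
  · intro h
    cases l with
    | nil => simp at h
    | cons x xs => simp at h; exact ⟨xs, by simp [h]⟩

theorem nbrsFrom_nil_of_no_match (L : List Char) (c : Char) :
    ∀ s, (∀ i, s ≤ i → i < L.length → L.getD i ' ' ≠ c) → nbrsFrom L c s = [] := by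
  intro s
  induction hn : L.length - s using Nat.strong_induction_on generalizing s with
  | _ n ih =>
    intro hno
    rw [nbrsFrom]
    by_cases hs : s < L.length
    · rw [if_pos hs, if_neg (hno s le_rfl hs), List.nil_append]
      exact ih (L.length - (s+1)) (by omega) (s+1) rfl (fun i h1 h2 => hno i (by omega) h2)
    · rw [if_neg hs]

theorem nbrsFrom_skip (L : List Char) (c : Char) :
    ∀ s p, s ≤ p → (∀ i, s ≤ i → i < p → i < L.length → L.getD i ' ' ≠ c) →
      nbrsFrom L c s = nbrsFrom L c p := by
  intro s p
  induction hn : p - s using Nat.strong_induction_on generalizing s with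
  | _ n ih =>
    intro hsp hno
    by_cases heq : s = p
    · rw [heq]
    · have hslt : s < p := by omega
      by_cases hs : s < L.length
      · rw [nbrsFrom, if_pos hs, if_neg (hno s le_rfl hslt hs), List.nil_append]
        exact ih (p - (s+1)) (by omega) (s+1) rfl (by omega)
          (fun i h1 h2 h3 => hno i (by omega) h2 h3)
      · rw [nbrsFrom, if_neg hs,
          nbrsFrom_nil_of_no_match L c p (fun i h1 h2 => absurd h2 (by omega))]

theorem mem_drop_iff_exists (c : Char) (L : List Char) (s : Nat) :
    c ∈ L.drop s ↔ ∃ i, s ≤ i ∧ i < L.length ∧ L.getD i ' ' = c := by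
  rw [List.mem_iff_getElem?]
  constructor
  · rintro ⟨j, hj⟩
    rw [List.getElem?_drop] at hj
    have hlt : s + j < L.length := (List.getElem?_eq_some_iff.mp hj).1
    exact ⟨s + j, by omega, hlt, by simp [List.getD_eq_getElem?_getD, hj]⟩
  · rintro ⟨i, h1, h2, h3⟩
    refine ⟨i - s, ?_⟩
    rw [List.getElem?_drop]
    have hadd : s + (i - s) = i := by omega
    rw [hadd, List.getElem?_eq_getElem h2]
    rw [List.getD_eq_getElem?_getD, List.getElem?_eq_getElem h2] at h3
    simpa using h3

theorem scan_eq_nbrsFrom (L : List Char) (c : Char) (b a : List Char) :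
    ∀ s, s ≤ L.length →
      badcharkeyScan L c b a s = (nbrsFrom L c s).map (fun nb => String.ofList (b ++ [nb] ++ a)) := by
  intro s
  induction hn : L.length + 1 - s using Nat.strong_induction_on generalizing s with
  | _ n ih =>
    intro hs
    rw [badcharkeyScan, dif_pos hs]
    by_cases h : PySem.Chars.findFrom L [c] (s : Int) = -1
    · rw [dif_pos h]
      have hinf := (PySem.Chars.findFrom_natCast_eq_neg_one_iff L [c] s hs).mp h
      rw [List.singleton_infix_iff, mem_drop_iff_exists] at hinf
      rw [nbrsFrom_nil_of_no_match L c s (fun i h1 h2 hc => hinf ⟨i, h1, h2, hc⟩)]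
      simp
    · rw [dif_neg h]
      have hspec := PySem.Chars.findFrom_natCast_spec L [c] s hs h
      set p := (PySem.Chars.findFrom L [c] (s : Int)).toNat with hp
      have hsp : s ≤ p := by
        have h1 := hspec.1
        omega
      have hplt : p < L.length := by
        rcases hspec.2.1 with ⟨t, ht⟩
        have hlen : (List.drop p L).length = t.length + 1 := by rw [← ht]; simp
        simp only [List.length_drop] at hlen
        omega
      have hmatch : L.getD p ' ' = c := by
        have h0 := (singleton_prefix_iff_head c (L.drop p)).mp hspec.2.1
        rw [List.getElem?_drop, Nat.add_zero] at h0
        rw [List.getD_eq_getElem?_getD, h0]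
        rfl
      have hmin : ∀ i, s ≤ i → i < p → i < L.length → L.getD i ' ' ≠ c := by
        intro i h1 h2 h3 hc
        apply hspec.2.2 i h1 h2
        rw [singleton_prefix_iff_head, List.getElem?_drop, Nat.add_zero,
          List.getElem?_eq_getElem h3]
        rw [List.getD_eq_getElem?_getD, List.getElem?_eq_getElem h3] at hc
        simpa using hc
      rw [nbrsFrom_skip L c s p hsp hmin]
      rw [nbrsFrom, if_pos hplt, if_pos hmatch]
      rw [ih (L.length + 1 - (p+1)) (by omega) (p+1) rfl (by omega)]
      simp only [nbrsAt, List.map_append]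
      congr 1
      · congr 1
        · split_ifs <;> simp
        · split_ifs <;> simp

-- the fold step of badcharkeyAdj, named so the lemmas can speak about it
def adjStep (L : List Char) (d : PySem.Dict Char (List Char)) (pc : Int × Char) :
    PySem.Dict Char (List Char) :=
  let pos := pc.1
  let ch := pc.2
  let l0 := d.getD ch []
  let l1 := if 0 < pos ∧ PySem.List.pyGetD L (pos - 1) ' ' ≠ '|'
            then l0 ++ [PySem.List.pyGetD L (pos - 1) ' '] else l0
  let l2 := if pos + 1 < (L.length : Int) ∧ PySem.List.pyGetD L (pos + 1) ' ' ≠ '|'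
            then l1 ++ [PySem.List.pyGetD L (pos + 1) ' '] else l1
  d.insert ch l2

theorem badcharkeyAdj_eq_foldl_adjStep (L : List Char) :
    badcharkeyAdj L = (PySem.List.enumerate L 0).foldl (adjStep L) PySem.Dict.empty := rfl

theorem adjStep_eq (L : List Char) (d : PySem.Dict Char (List Char)) (s : Nat) (x : Char)
    (hs : s < L.length) :
    adjStep L d ((s : Int), x) = d.insert x (d.getD x [] ++ nbrsAt L s) := by
  rw [adjStep, nbrsAt]
  congr 1
  by_cases h0 : 0 < s
  · have hcast1 : PySem.List.pyGetD L ((s : Int) - 1) ' ' = L.getD (s-1) ' ' := by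
      have he : ((s : Int) - 1) = ((s - 1 : Nat) : Int) := by omega
      rw [he, PySem.List.pyGetD_natCast]
    have hcast2 : PySem.List.pyGetD L ((s : Int) + 1) ' ' = L.getD (s+1) ' ' := by
      have he : ((s : Int) + 1) = ((s + 1 : Nat) : Int) := by omega
      rw [he, PySem.List.pyGetD_natCast]
    have hc0 : (0 < (s : Int)) ↔ (0 < s) := by omega
    have hc1 : ((s : Int) + 1 < (L.length : Int)) ↔ (s + 1 < L.length) := by omega
    simp only [hcast1, hcast2, hc0, hc1]
    split_ifs <;> simp_all [List.append_assoc]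
  · have hs0 : s = 0 := by omega
    subst hs0
    have hcast2 : PySem.List.pyGetD L (((0:Nat) : Int) + 1) ' ' = L.getD 1 ' ' := by
      have he : (((0:Nat) : Int) + 1) = ((1 : Nat) : Int) := by omega
      rw [he, PySem.List.pyGetD_natCast]
    have hc1 : (((0:Nat) : Int) + 1 < (L.length : Int)) ↔ (0 + 1 < L.length) := by omega
    simp only [hcast2, hc1]
    split_ifs <;> simp_all

theorem adj_foldl_eq (L : List Char) (c : Char) :
    ∀ (t : List Char) (s : Nat) (d : PySem.Dict Char (List Char)),
      t = L.drop s →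
      ((PySem.List.enumerate t (s : Int)).foldl (adjStep L) d).getD c []
      = d.getD c [] ++ nbrsFrom L c s := by
  intro t
  induction t with
  | nil =>
    intro s d ht
    have hsl : L.length ≤ s := by
      have hl := congrArg List.length ht
      simp only [List.length_nil, List.length_drop] at hl
      omega
    rw [nbrsFrom, if_neg (by omega)]
    simp [PySem.List.enumerate]
  | cons x xs ih =>
    intro s d ht
    have hs : s < L.length := by
      have hl := congrArg List.length ht
      simp only [List.length_cons, List.length_drop] at hl
      omega
    have hx : L.getD s ' ' = x := by
      have h0 : (L.drop s)[0]? = some x := by rw [← ht]; rfl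
      rw [List.getElem?_drop, Nat.add_zero] at h0
      rw [List.getD_eq_getElem?_getD, h0]
      rfl
    have hxs : xs = L.drop (s+1) := by
      have htl : (L.drop s).tail = L.drop (s+1) := by rw [List.tail_drop]
      rw [← htl, ← ht]
      rfl

    rw [PySem.List.enumerate_cons, List.foldl_cons, adjStep_eq L d s x hs]
    have hcast : ((s : Int) + 1) = (((s+1 : Nat)) : Int) := by omega
    rw [hcast, ih (s+1) _ hxs]
    rw [PySem.Dict.getD_insert]
    conv_rhs => rw [nbrsFrom]
    rw [if_pos hs]
    by_cases hc : c = x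
    · subst hc
      rw [if_pos rfl, if_pos hx]
      rw [List.append_assoc]
    · rw [if_neg hc]
      have hnm : ¬ (L.getD s ' ' = c) := fun hcc => hc (by rw [← hcc, hx])
      rw [if_neg hnm, List.nil_append]

theorem adj_getD_eq (L : List Char) (c : Char) :
    (badcharkeyAdj L).getD c [] = nbrsFrom L c 0 := by
  rw [badcharkeyAdj_eq_foldl_adjStep]
  have h := adj_foldl_eq L c L 0 PySem.Dict.empty (by simp)
  simp only [Nat.cast_zero] at h
  rw [h]
  simp [PySem.Dict.getD, PySem.Dict.empty, PySem.Dict.get?]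

-- ===== VERDICT (by name: the statement is the Claim_ definition above) =====
theorem badcharkey_spec : Claim_equal_badcharkey := by
  intro word layout _
  unfold Spec_badcharkey badcharkey badcharkey_alt
  simp only []
  congr 1
  funext ic
  congr 1
  rw [adj_getD_eq]
  by_cases hL : layout.toList = []
  · rw [if_pos hL, hL, nbrsFrom]
    simp
  · rw [if_neg hL]
    exact scan_eq_nbrsFrom layout.toList ic.2 _ _ 0 (Nat.zero_le _)
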